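-- pv_equiv track=rewrite | github.com/KeshavSanthanam/keshavsanthanam.github.io | build.py | group_posts_by_tag
-- ===== SOURCE A (Python) =====
-- def group_posts_by_tag(posts, max_posts=10):
--     """Group posts by tag and limit to most recent."""
--     # Take only the most recent posts
--     recent_posts = posts[:max_posts]
--
--     # Group by tag
--     grouped = {}
--     for post in recent_posts:
--         tag = post['tag']
--         if tag not in grouped:
--             grouped[tag] = []
--         grouped[tag].append(post)
--
--     return grouped
-- ===== SOURCE B (Python) =====
-- def group_posts_by_tag(posts, max_posts=10):
--     """Group posts by tag and limit to most recent."""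
--     recent = posts[:max_posts]
--     tags = list(dict.fromkeys(p['tag'] for p in recent))
--     return {t: [p for p in recent if p['tag'] == t] for t in tags}
-- ===== Notes on version B (the rewrite author's own statement) =====
-- stated objective: idiomatic
-- what changed: Replaces A's mutable-dict accumulation loop (membership test, seed with [], append) by a declarative two-pass form: ordered distinct tags via dict.fromkeys, then a dict comprehension filtering the recent slice once per tag.
import Mathlib
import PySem

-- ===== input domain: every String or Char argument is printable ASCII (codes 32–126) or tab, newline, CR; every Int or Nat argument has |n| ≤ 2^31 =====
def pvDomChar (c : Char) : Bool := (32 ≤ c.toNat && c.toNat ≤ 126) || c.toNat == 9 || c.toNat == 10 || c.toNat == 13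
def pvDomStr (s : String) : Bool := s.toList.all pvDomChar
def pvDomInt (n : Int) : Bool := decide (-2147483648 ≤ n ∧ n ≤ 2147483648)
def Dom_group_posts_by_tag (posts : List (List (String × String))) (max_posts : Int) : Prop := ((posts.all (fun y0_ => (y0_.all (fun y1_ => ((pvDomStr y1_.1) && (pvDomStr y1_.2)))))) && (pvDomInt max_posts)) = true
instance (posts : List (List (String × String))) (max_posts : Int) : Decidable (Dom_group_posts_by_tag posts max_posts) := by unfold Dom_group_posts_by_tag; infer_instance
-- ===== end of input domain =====

-- B replaces A's mutable-dict accumulation loop by a declarative two-pass form (ordered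
-- distinct tags via dict.fromkeys, then one filter per tag); objective: idiomatic, not faster.

-- post['tag'] (both Pythons); total via a default — Pre_ guarantees the key is present
def pvTag (post : List (String × String)) : String :=
  (PySem.Dict.mk post).getD "tag" ""

-- ===== PORT A =====
def group_posts_by_tag (posts : List (List (String × String))) (max_posts : Int) : List (String × List (List (String × String))) :=
  let recent_posts := PySem.List.slice posts none (some max_posts)
  let grouped : PySem.Dict String (List (List (String × String))) :=
    recent_posts.foldl (fun grouped post =>
      let tag := pvTag post
      let grouped := if grouped.contains tag then grouped else grouped.insert tag []
      grouped.insert tag (grouped.getD tag [] ++ [post])) PySem.Dict.empty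
  grouped.items

-- ===== PORT B =====
def group_posts_by_tag_alt (posts : List (List (String × String))) (max_posts : Int) : List (String × List (List (String × String))) :=
  let recent := PySem.List.slice posts none (some max_posts)
  let tags := PySem.List.dedup (recent.map pvTag)
  tags.map (fun t => (t, recent.filter (fun p => pvTag p == t)))

-- ===== PRECONDITION & SPEC =====
-- Pre_ excludes inputs where a sliced post lacks the key 'tag': there both Pythons raise KeyError.
def Pre_group_posts_by_tag (posts : List (List (String × String))) (max_posts : Int) : Prop :=
  ∀ post ∈ PySem.List.slice posts none (some max_posts), (PySem.Dict.mk post).contains "tag" = true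
instance (posts : List (List (String × String))) (max_posts : Int) : Decidable (Pre_group_posts_by_tag posts max_posts) := by unfold Pre_group_posts_by_tag; infer_instance
def pvWitness_group_posts_by_tag : (List (List (String × String))) × Int :=
  ([[("tag", "news"), ("title", "a")], [("tag", "blog"), ("title", "b")], [("tag", "news"), ("title", "c")]], 10)

def Spec_group_posts_by_tag (posts : List (List (String × String))) (max_posts : Int) (out : List (String × List (List (String × String)))) : Prop := out = group_posts_by_tag_alt posts max_posts
instance (posts : List (List (String × String))) (max_posts : Int) (out : List (String × List (List (String × String)))) : Decidable (Spec_group_posts_by_tag posts max_posts out) := by unfold Spec_group_posts_by_tag; infer_instance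

-- ===== CLAIM (what is proved, stated in full; the proofs are below) =====
def Claim_equal_group_posts_by_tag : Prop := ∀ (posts : List (List (String × String))) (max_posts : Int), Dom_group_posts_by_tag posts max_posts → Pre_group_posts_by_tag posts max_posts → Spec_group_posts_by_tag posts max_posts (group_posts_by_tag posts max_posts)

-- ===== LEMMAS AND PROOFS =====

-- A's loop body (setdefault-[] then append) is exactly Dict.modify with default []
theorem pvStep_eq_modify (d : PySem.Dict String (List (List (String × String)))) (post : List (String × String)) :
    (let tag := pvTag post
     let d' := if d.contains tag then d else d.insert tag []
     d'.insert tag (d'.getD tag [] ++ [post]))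
    = d.modify (pvTag post) [] (fun l => l ++ [post]) := by
  by_cases h : d.contains (pvTag post) = true
  · simp only [h, if_true]
    show d.insert (pvTag post) (d.getD (pvTag post) [] ++ [post]) = _
    rfl
  · simp only [h]
    show (d.insert (pvTag post) []).insert (pvTag post)
        ((d.insert (pvTag post) []).getD (pvTag post) [] ++ [post])
      = d.insert (pvTag post) (d.getD (pvTag post) [] ++ [post])
    rw [PySem.Dict.insert_insert_self, PySem.Dict.getD_insert_self,
        PySem.Dict.getD_of_not_contains d [] (by simpa using h)]

theorem pvGrouped_items (recent : List (List (String × String))) :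
    (recent.foldl (fun d p => d.modify (pvTag p) [] (fun l => l ++ [p]))
        (PySem.Dict.empty : PySem.Dict String (List (List (String × String))))).items
    = (PySem.List.dedup (recent.map pvTag)).map
        (fun t => (t, recent.filter (fun p => pvTag p == t))) := by
  set D := recent.foldl (fun d p => d.modify (pvTag p) [] (fun l => l ++ [p]))
      (PySem.Dict.empty : PySem.Dict String (List (List (String × String)))) with hD
  have hkeys : D.keys = PySem.List.dedup (recent.map pvTag) := by
    rw [hD, PySem.Dict.keys_foldl_modify_key recent pvTag [] (fun _ p l => l ++ [p])]
    rfl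
  have hnd : D.keys.Nodup := by
    rw [hD]
    exact PySem.Dict.nodup_keys_foldl_modify_key recent pvTag [] (fun _ p l => l ++ [p]) _
      PySem.Dict.nodup_keys_empty
  have hgetD : ∀ t, D.getD t [] = recent.filter (fun p => pvTag p == t) := by
    intro t
    have : D = (recent.map (fun p => (pvTag p, p))).foldl
        (fun d q => d.modify q.1 [] (fun l => l ++ [q.2])) PySem.Dict.empty := by
      rw [hD, List.foldl_map]
    rw [this, PySem.Dict.getD_foldl_modify_append, PySem.Dict.getD_empty, List.nil_append,
        List.filter_map, List.map_map]
    simp [Function.comp_def]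
  rw [PySem.Dict.items_eq_map_keys D hnd [], hkeys]
  exact List.map_congr_left (fun t _ => by rw [hgetD t])

-- ===== VERDICT (by name: the statement is the Claim_ definition above) =====
theorem group_posts_by_tag_spec : Claim_equal_group_posts_by_tag := by
  intro posts max_posts _ _
  unfold Spec_group_posts_by_tag group_posts_by_tag group_posts_by_tag_alt
  simp only []
  rw [show (fun (grouped : PySem.Dict String (List (List (String × String)))) post =>
      let tag := pvTag post
      let grouped := if grouped.contains tag then grouped else grouped.insert tag []
      grouped.insert tag (grouped.getD tag [] ++ [post]))
    = (fun d p => d.modify (pvTag p) [] (fun l => l ++ [p])) from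
      funext fun d => funext fun p => pvStep_eq_modify d p]
  exact pvGrouped_items _
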